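-- pv_equiv track=rewrite | github.com/profkjones/ITECLAB | archive/readings-tool/parse_weekly_readings.py | split_entries
-- ===== SOURCE A (Python) =====
-- from typing import List, Dict
--
-- def split_entries(text: str) -> List[str]:
--     lines = [ln.rstrip() for ln in text.splitlines()]
--     out: List[str] = []
--     current: List[str] = []
--
--     for ln in lines:
--         if ln.strip() == "":
--             if current:
--                 out.append(" ".join(current).strip())
--                 current = []
--             continue
--         current.append(ln.strip())
--
--     if current:
--         out.append(" ".join(current).strip())
--
--     return [e for e in out if e]
-- ===== SOURCE B (Python) =====
-- from typing import List
--
-- def split_entries(text: str) -> List[str]: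
--     lines = [ln.strip() for ln in text.splitlines()]
--     bounds = [-1] + [i for i, ln in enumerate(lines) if ln == ""] + [len(lines)]
--     return [" ".join(lines[i + 1:j]) for i, j in zip(bounds, bounds[1:]) if j > i + 1]
-- ===== Notes on version B (the rewrite author's own statement) =====
-- stated objective: simpler
-- what changed: Instead of A's stateful single pass with a current-line buffer, end-of-loop flush and final filter, B first computes the list of blank-line positions (with -1/len sentinels) and then emits one entry per adjacent boundary pair by slicing and joining the lines strictly between them.
import Mathlib
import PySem

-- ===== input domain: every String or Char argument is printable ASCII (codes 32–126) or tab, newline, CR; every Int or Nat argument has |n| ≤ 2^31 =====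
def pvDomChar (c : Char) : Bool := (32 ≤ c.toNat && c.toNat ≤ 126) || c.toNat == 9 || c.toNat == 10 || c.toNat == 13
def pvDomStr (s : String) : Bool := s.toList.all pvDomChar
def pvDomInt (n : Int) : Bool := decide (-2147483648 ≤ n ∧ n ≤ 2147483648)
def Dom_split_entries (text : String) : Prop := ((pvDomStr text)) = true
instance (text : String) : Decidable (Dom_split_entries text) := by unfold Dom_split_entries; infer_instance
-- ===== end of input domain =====

-- B replaces A's stateful buffer-and-flush scan by two staged passes: collect the blank-line
-- positions (with -1/len sentinels), then slice-and-join the lines between adjacent boundaries.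

-- ===== PORT A =====
def split_entries (text : String) : List String :=
  let lines := (PySem.Str.splitlines text).map (fun ln => PySem.Str.rstrip ln)
  let st := lines.foldl (fun (st : List String × List String) ln =>
      if PySem.Str.strip ln = "" then
        (if st.2 ≠ [] then (st.1 ++ [PySem.Str.strip (PySem.Str.join " " st.2)], ([] : List String)) else st)
      else (st.1, st.2 ++ [PySem.Str.strip ln]))
    (([] : List String), ([] : List String))
  let out := if st.2 ≠ [] then st.1 ++ [PySem.Str.strip (PySem.Str.join " " st.2)] else st.1
  out.filter (fun e => decide (e ≠ ""))

-- ===== PORT B =====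
def split_entries_alt (text : String) : List String :=
  let lines := (PySem.Str.splitlines text).map (fun ln => PySem.Str.strip ln)
  let bounds : List Int :=
    [-1] ++ (PySem.List.enumerate lines).filterMap (fun p => if p.2 = "" then some p.1 else none)
         ++ [(lines.length : Int)]
  (bounds.zip (bounds.drop 1)).filterMap (fun p =>
    if p.2 > p.1 + 1 then some (PySem.Str.join " " (PySem.List.slice lines (some (p.1 + 1)) (some p.2)))
    else none)

-- ===== PRECONDITION & SPEC =====
def Spec_split_entries (text : String) (out : List String) : Prop := out = split_entries_alt text
instance (text : String) (out : List String) : Decidable (Spec_split_entries text out) := by unfold Spec_split_entries; infer_instance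

-- ===== CLAIM (what is proved, stated in full; the proofs are below) =====
def Claim_equal_split_entries : Prop := ∀ (text : String), Dom_split_entries text → Spec_split_entries text (split_entries text)

-- ===== LEMMAS AND PROOFS =====

-- Char-level whitespace-trimming facts
theorem pv_dropWhile_idem {α : Type} (p : α → Bool) (l : List α) :
    List.dropWhile p (List.dropWhile p l) = List.dropWhile p l := by
  induction l with
  | nil => rfl
  | cons a t ih => by_cases h : p a <;> simp [List.dropWhile_cons, h, ih]

theorem pv_head_not_space {a : Char} {t : List Char}
    (h : PySem.Chars.lstrip (a :: t) = a :: t) : PySem.Chars.isspace a = false := by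
  by_contra hc
  have ha : PySem.Chars.isspace a = true := by
    cases hh : PySem.Chars.isspace a
    · exact absurd hh hc
    · rfl
  simp only [PySem.Chars.lstrip, List.dropWhile_cons, ha, if_true] at h
  have := List.length_dropWhile_le PySem.Chars.isspace t
  have := congrArg List.length h
  simp at this
  omega

theorem pv_lstrip_cons_false {a : Char} (t : List Char)
    (h : PySem.Chars.isspace a = false) : PySem.Chars.lstrip (a :: t) = a :: t := by
  simp [PySem.Chars.lstrip, List.dropWhile_cons, h]

theorem pv_lstrip_of_strip {cs : List Char} (h : PySem.Chars.strip cs = cs) :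
    PySem.Chars.lstrip cs = cs := by
  have h1 : (PySem.Chars.lstrip cs).length ≤ cs.length :=
    List.length_dropWhile_le _ _
  have h2 : (PySem.Chars.strip cs).length ≤ (PySem.Chars.lstrip cs).length := by
    simp only [PySem.Chars.strip, PySem.Chars.rstrip, List.length_reverse]
    simpa using List.length_dropWhile_le PySem.Chars.isspace (PySem.Chars.lstrip cs).reverse
  rw [h] at h2
  exact (List.dropWhile_suffix _).eq_of_length (le_antisymm h1 h2)

theorem pv_rstrip_of_strip {cs : List Char} (h : PySem.Chars.strip cs = cs) :
    PySem.Chars.rstrip cs = cs := by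
  have hl := pv_lstrip_of_strip h
  have : PySem.Chars.strip cs = PySem.Chars.rstrip (PySem.Chars.lstrip cs) := rfl
  rw [this, hl] at h
  exact h

theorem pv_lstrip_append {x y : List Char}
    (hx : PySem.Chars.lstrip x = x) (hne : x ≠ []) :
    PySem.Chars.lstrip (x ++ y) = x ++ y := by
  obtain ⟨a, t, rfl⟩ : ∃ a t, x = a :: t := by
    cases x with
    | nil => exact absurd rfl hne
    | cons a t => exact ⟨a, t, rfl⟩
  have ha := pv_head_not_space hx
  simp [PySem.Chars.lstrip, List.dropWhile_cons, ha]

theorem pv_rstrip_append {x y : List Char}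
    (hy : PySem.Chars.rstrip y = y) (hne : y ≠ []) :
    PySem.Chars.rstrip (x ++ y) = x ++ y := by
  have hrev : List.dropWhile PySem.Chars.isspace y.reverse = y.reverse := by
    have := congrArg List.reverse hy
    simpa [PySem.Chars.rstrip] using this
  obtain ⟨b, s, hbs⟩ : ∃ b s, y.reverse = b :: s := by
    cases hyr : y.reverse with
    | nil => exact absurd (by simpa using congrArg List.reverse hyr) hne
    | cons b s => exact ⟨b, s, rfl⟩
  have hb : PySem.Chars.isspace b = false := by
    apply pv_head_not_space (t := s)
    simpa [PySem.Chars.lstrip, hbs] using hrev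
  have h1 : (x ++ y).reverse = b :: (s ++ x.reverse) := by
    rw [List.reverse_append, hbs]; simp
  have hy' : y = s.reverse ++ [b] := by
    have := congrArg List.reverse hbs; simpa using this
  show (List.dropWhile PySem.Chars.isspace (x ++ y).reverse).reverse = x ++ y
  rw [h1, List.dropWhile_cons, hb]
  simp [hy']

-- the "good" predicate: a stripped, non-empty chunk of characters
def pvGood (cs : List Char) : Prop := PySem.Chars.strip cs = cs ∧ cs ≠ []

theorem pv_join_good (parts : List (List Char)) (hne : parts ≠ [])
    (hg : ∀ q ∈ parts, pvGood q) : pvGood (PySem.Chars.join [' '] parts) := by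
  induction parts with
  | nil => exact absurd rfl hne
  | cons p rest ih =>
    have hp := hg p (by simp)
    cases rest with
    | nil =>
      simpa [PySem.Chars.join_singleton] using hp
    | cons q rest' =>
      have hrec : pvGood (PySem.Chars.join [' '] (q :: rest')) := by
        apply ih (by simp)
        intro r hr; exact hg r (by simp [hr])
      rw [PySem.Chars.join_cons_cons]
      have hj := hrec
      have hln : PySem.Chars.lstrip (p ++ ([' '] ++ PySem.Chars.join [' '] (q :: rest')))
          = p ++ ([' '] ++ PySem.Chars.join [' '] (q :: rest')) :=
        pv_lstrip_append (pv_lstrip_of_strip hp.1) hp.2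
      have hrn : PySem.Chars.rstrip ((p ++ [' ']) ++ PySem.Chars.join [' '] (q :: rest'))
          = (p ++ [' ']) ++ PySem.Chars.join [' '] (q :: rest') :=
        pv_rstrip_append (pv_rstrip_of_strip hj.1) hj.2
      constructor
      · show PySem.Chars.rstrip (PySem.Chars.lstrip _) = _
        rw [show p ++ [' '] ++ PySem.Chars.join [' '] (q :: rest')
              = p ++ ([' '] ++ PySem.Chars.join [' '] (q :: rest')) by simp]
        rw [hln]
        rw [show p ++ ([' '] ++ PySem.Chars.join [' '] (q :: rest'))
              = (p ++ [' ']) ++ PySem.Chars.join [' '] (q :: rest') by simp]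
        exact hrn
      · cases p with
        | nil => exact absurd rfl hp.2
        | cons a t => simp

theorem pv_rstrip_cons (a : Char) (t : List Char) :
    PySem.Chars.rstrip (a :: t) =
      if (PySem.Chars.rstrip t).isEmpty then
        (if PySem.Chars.isspace a then [] else [a])
      else a :: PySem.Chars.rstrip t := by
  have he : (PySem.Chars.rstrip t).isEmpty
      = (List.dropWhile PySem.Chars.isspace t.reverse).isEmpty := by
    simp [PySem.Chars.rstrip]
  simp only [PySem.Chars.rstrip, List.reverse_cons, List.dropWhile_append]
  by_cases h : (List.dropWhile PySem.Chars.isspace t.reverse).isEmpty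
  · by_cases ha : PySem.Chars.isspace a <;> simp [h, ha, ← he, List.dropWhile_cons]
  · simp [h, ← he]

theorem pv_lstrip_rstrip_comm (cs : List Char) :
    PySem.Chars.lstrip (PySem.Chars.rstrip cs) = PySem.Chars.rstrip (PySem.Chars.lstrip cs) := by
  induction cs with
  | nil => rfl
  | cons a t ih =>
    by_cases hp : PySem.Chars.isspace a
    · have hl : PySem.Chars.lstrip (a :: t) = PySem.Chars.lstrip t := by
        simp [PySem.Chars.lstrip, List.dropWhile_cons, hp]
      rw [pv_rstrip_cons, hl, ← ih]
      by_cases he : (PySem.Chars.rstrip t).isEmpty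
      · have : PySem.Chars.rstrip t = [] := by simpa [List.isEmpty_iff] using he
        simp [he, hp, this, PySem.Chars.lstrip]
      · have : PySem.Chars.lstrip (a :: PySem.Chars.rstrip t)
            = PySem.Chars.lstrip (PySem.Chars.rstrip t) := by
          simp [PySem.Chars.lstrip, List.dropWhile_cons, hp]
        simp [he, this]
    · have hp' : PySem.Chars.isspace a = false := by simpa using hp
      have hl : PySem.Chars.lstrip (a :: t) = a :: t := pv_lstrip_cons_false t hp'
      rw [pv_rstrip_cons, hl, pv_rstrip_cons]
      by_cases he : (PySem.Chars.rstrip t).isEmpty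
      · simp [he, hp', pv_lstrip_cons_false]
      · simp [he, pv_lstrip_cons_false _ hp']

theorem pv_rstrip_idem (cs : List Char) :
    PySem.Chars.rstrip (PySem.Chars.rstrip cs) = PySem.Chars.rstrip cs := by
  simp [PySem.Chars.rstrip, List.reverse_reverse, pv_dropWhile_idem]

theorem pv_strip_eq (u : List Char) :
    PySem.Chars.strip u = PySem.Chars.rstrip (PySem.Chars.lstrip u) := rfl

theorem pv_strip_rstrip (cs : List Char) :
    PySem.Chars.strip (PySem.Chars.rstrip cs) = PySem.Chars.strip cs := by
  rw [pv_strip_eq, pv_strip_eq, pv_lstrip_rstrip_comm, pv_rstrip_idem]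

theorem pv_lstrip_idem (cs : List Char) :
    PySem.Chars.lstrip (PySem.Chars.lstrip cs) = PySem.Chars.lstrip cs :=
  pv_dropWhile_idem _ _

theorem pv_strip_idem (cs : List Char) :
    PySem.Chars.strip (PySem.Chars.strip cs) = PySem.Chars.strip cs := by
  conv_lhs => rw [show PySem.Chars.strip cs = PySem.Chars.rstrip (PySem.Chars.lstrip cs) from rfl]
  rw [pv_strip_rstrip, pv_strip_eq, pv_lstrip_idem, ← pv_strip_eq]

-- String-level transfers
theorem pv_sstrip_rstrip (s : String) :
    PySem.Str.strip (PySem.Str.rstrip s) = PySem.Str.strip s := by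
  apply String.toList_inj.mp
  simp [PySem.Str.toList_strip, PySem.Str.toList_rstrip, pv_strip_rstrip]

theorem pv_sstrip_idem (s : String) :
    PySem.Str.strip (PySem.Str.strip s) = PySem.Str.strip s := by
  apply String.toList_inj.mp
  simp [PySem.Str.toList_strip, pv_strip_idem]

def pvSGood (s : String) : Prop := PySem.Str.strip s = s ∧ s ≠ ""

theorem pv_sgood_iff (s : String) : pvSGood s ↔ pvGood s.toList := by
  constructor
  · rintro ⟨h1, h2⟩
    refine ⟨by rw [← PySem.Str.toList_strip, h1], ?_⟩
    intro hc
    exact h2 (String.toList_inj.mp (by simp [hc]))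
  · rintro ⟨h1, h2⟩
    refine ⟨String.toList_inj.mp (by rw [PySem.Str.toList_strip, h1]), ?_⟩
    intro hc
    subst hc
    simp at h2

theorem pv_sjoin_good (parts : List String) (hne : parts ≠ [])
    (hg : ∀ q ∈ parts, pvSGood q) : pvSGood (PySem.Str.join " " parts) := by
  rw [pv_sgood_iff]
  rw [PySem.Str.toList_join]
  have hsep : (" " : String).toList = [' '] := rfl
  rw [hsep]
  apply pv_join_good
  · simpa using hne
  · intro q hq
    simp only [List.mem_map] at hq
    obtain ⟨r, hr, rfl⟩ := hq
    exact (pv_sgood_iff r).mp (hg r hr)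

-- A's loop, abstracted over already-stripped items
def pvStep (st : List String × List String) (s : String) : List String × List String :=
  if s = "" then
    (if st.2 ≠ [] then (st.1 ++ [PySem.Str.strip (PySem.Str.join " " st.2)], ([] : List String)) else st)
  else (st.1, st.2 ++ [s])

def pvFinish (st : List String × List String) : List String :=
  if st.2 ≠ [] then st.1 ++ [PySem.Str.strip (PySem.Str.join " " st.2)] else st.1

-- the run-based intermediate form: maximal blank/non-blank runs
def pvRuns (ls : List String) : List (Bool × List String) :=
  match ls with
  | [] => []
  | s :: rest =>
    let k : Bool := s == ""
    (k, s :: rest.takeWhile (fun t => (t == "") == k)) ::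
      pvRuns (rest.dropWhile (fun t => (t == "") == k))
termination_by ls.length
decreasing_by
  simp only [List.length_cons]
  exact Nat.lt_succ_of_le (List.length_dropWhile_le _ _)

def pvAltB (ls : List String) : List String :=
  (pvRuns ls).filterMap (fun g => if g.1 then none else some (PySem.Str.join " " g.2))

theorem pv_acc (l : List String) (o o' c : List String) :
    l.foldl pvStep (o ++ o', c)
      = (o ++ (l.foldl pvStep (o', c)).1, (l.foldl pvStep (o', c)).2) := by
  induction l generalizing o' c with
  | nil => simp
  | cons s t ih =>
    simp only [List.foldl_cons]
    by_cases hs : s = ""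
    · by_cases hc : c = []
      · rw [show pvStep (o ++ o', c) s = (o ++ o', c) by simp [pvStep, hs, hc],
            show pvStep (o', c) s = (o', c) by simp [pvStep, hs, hc]]
        exact ih o' c
      · rw [show pvStep (o ++ o', c) s
              = (o ++ (o' ++ [PySem.Str.strip (PySem.Str.join " " c)]), ([] : List String)) by
            simp [pvStep, hs, hc],
            show pvStep (o', c) s
              = (o' ++ [PySem.Str.strip (PySem.Str.join " " c)], ([] : List String)) by
            simp [pvStep, hs, hc]]
        exact ih _ []
    · rw [show pvStep (o ++ o', c) s = (o ++ o', c ++ [s]) by simp [pvStep, hs],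
          show pvStep (o', c) s = (o', c ++ [s]) by simp [pvStep, hs]]
      exact ih o' (c ++ [s])

theorem pvFinish_append (o : List String) (st : List String × List String) :
    pvFinish (o ++ st.1, st.2) = o ++ pvFinish st := by
  by_cases h : st.2 ≠ [] <;> simp [pvFinish, h]

theorem pvAltB_nil : pvAltB [] = [] := by
  simp [pvAltB, pvRuns]

theorem pvAltB_dropBlank (rest : List String) :
    pvAltB (rest.dropWhile (fun t => (t == "") == true)) = pvAltB rest := by
  cases rest with
  | nil => rfl
  | cons t r =>
    by_cases ht : t = ""
    · subst ht
      rw [List.dropWhile_cons]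
      simp only [show (("" == "") == true) = true from rfl, if_true]
      conv_rhs => rw [pvAltB, pvRuns]
      simp [pvAltB]
    · have : ((t == "") == true) = false := by simp [ht]
      rw [List.dropWhile_cons, this]
      simp

theorem pvAltB_blank (rest : List String) :
    pvAltB ("" :: rest) = pvAltB rest := by
  rw [pvAltB, pvRuns]
  simp only [show (("" : String) == "") = true from rfl]
  rw [show ((true, ("" : String) :: rest.takeWhile (fun t => (t == "") == true)) ::
        pvRuns (rest.dropWhile (fun t => (t == "") == true))).filterMap
        (fun g => if g.1 then none else some (PySem.Str.join " " g.2))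
      = pvAltB (rest.dropWhile (fun t => (t == "") == true)) by simp [pvAltB]]
  exact pvAltB_dropBlank rest

theorem pvAltB_cons_nonblank (s : String) (rest : List String) (hs : s ≠ "") :
    pvAltB (s :: rest) =
      PySem.Str.join " " (s :: rest.takeWhile (fun t => (t == "") == false)) ::
        pvAltB (rest.dropWhile (fun t => (t == "") == false)) := by
  rw [pvAltB, pvRuns]
  simp only [show (s == "") = false by simp [hs]]
  simp [pvAltB]

theorem pv_main (ss : List String) (cur : List String)
    (hss : ∀ s ∈ ss, PySem.Str.strip s = s) (hcur : ∀ c ∈ cur, pvSGood c) :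
    pvFinish (ss.foldl pvStep ([], cur)) =
      (if cur = [] then pvAltB ss
       else PySem.Str.join " " (cur ++ ss.takeWhile (fun t => (t == "") == false)) ::
            pvAltB (ss.dropWhile (fun t => (t == "") == false))) := by
  induction ss generalizing cur with
  | nil =>
    by_cases hc : cur = []
    · simp [hc, pvFinish, pvAltB_nil]
    · have hgood := pv_sjoin_good cur hc hcur
      simp [hc, pvFinish, pvAltB_nil, hgood.1]
  | cons s rest ih =>
    have hs : PySem.Str.strip s = s := hss s (by simp)
    have hrest : ∀ t ∈ rest, PySem.Str.strip t = t := fun t ht => hss t (by simp [ht])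
    by_cases hb : s = ""
    · subst hb
      by_cases hc : cur = []
      · subst hc
        have hstep : pvStep ([], []) "" = ([], []) := by simp [pvStep]
        rw [List.foldl_cons, hstep, ih [] hrest (by simp), pvAltB_blank]
        simp
      · have hgood := pv_sjoin_good cur hc hcur
        have hstep : pvStep ([], cur) ""
            = ([PySem.Str.strip (PySem.Str.join " " cur)], []) := by
          simp [pvStep, hc]
        rw [List.foldl_cons, hstep]
        have hacc := pv_acc rest [PySem.Str.strip (PySem.Str.join " " cur)] [] []
        simp only [List.append_nil] at hacc
        rw [show rest.foldl pvStep ([PySem.Str.strip (PySem.Str.join " " cur)], [])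
              = rest.foldl pvStep ([PySem.Str.strip (PySem.Str.join " " cur)] ++ [], []) by simp,
            pv_acc]
        rw [show rest.foldl pvStep ([], []) = (((rest.foldl pvStep ([], [])).1),
              ((rest.foldl pvStep ([], [])).2)) from rfl] at *
        rw [pvFinish_append]
        rw [ih [] hrest (by simp)]
        simp only [if_true, reduceIte]
        have htw : List.takeWhile (fun t => (t == "") == false) ("" :: rest) = [] := by
          simp [List.takeWhile_cons]
        have hdw : List.dropWhile (fun t => (t == "") == false) ("" :: rest) = "" :: rest := by
          simp [List.dropWhile_cons]
        simp [hc, htw, hdw, pvAltB_blank, hgood.1]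
    · have hstep : pvStep ([], cur) s = ([], cur ++ [s]) := by simp [pvStep, hb]
      rw [List.foldl_cons, hstep]
      have hcur' : ∀ c ∈ cur ++ [s], pvSGood c := by
        intro c hcmem
        rcases List.mem_append.mp hcmem with h | h
        · exact hcur c h
        · simp at h; subst h; exact ⟨hs, hb⟩
      rw [ih (cur ++ [s]) hrest hcur']
      have hne : cur ++ [s] ≠ [] := by simp
      simp only [hne, if_false, reduceIte]
      have hps : ((s == "") == false) = true := by simp [hb]
      by_cases hc : cur = []
      · subst hc
        rw [pvAltB_cons_nonblank s rest hb]
        simp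
      · simp only [hc, if_false, reduceIte]
        rw [List.takeWhile_cons, List.dropWhile_cons, hps]
        simp [List.append_assoc]

-- ===== the bounds/slice side: B's staged-pass form equals the run-based form =====

-- blank positions starting at offset s (B's enumerate pass, generalized over the start)
def pvEB (ls : List String) (s : Int) : List Int :=
  (PySem.List.enumerate ls s).filterMap (fun p => if p.2 = "" then some p.1 else none)

def pvBnds (ls : List String) (c : Int) : List Int :=
  (c - 1) :: (pvEB ls c ++ [c + (ls.length : Int)])

def pvPairs (bs : List Int) (lines : List String) : List String :=
  (bs.zip (bs.drop 1)).filterMap (fun p =>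
    if p.2 > p.1 + 1 then some (PySem.Str.join " " (PySem.List.slice lines (some (p.1 + 1)) (some p.2)))
    else none)

theorem pvEB_nil (s : Int) : pvEB [] s = [] := by
  simp [pvEB, PySem.List.enumerate_nil]

theorem pvEB_cons_blank (rest : List String) (s : Int) :
    pvEB ("" :: rest) s = s :: pvEB rest (s + 1) := by
  simp [pvEB, PySem.List.enumerate_cons]

theorem pvEB_cons_nonblank (x : String) (rest : List String) (s : Int) (hx : x ≠ "") :
    pvEB (x :: rest) s = pvEB rest (s + 1) := by
  simp [pvEB, PySem.List.enumerate_cons, hx]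

theorem pvEB_append (A B : List String) (s : Int) :
    pvEB (A ++ B) s = pvEB A s ++ pvEB B (s + A.length) := by
  simp [pvEB, PySem.List.enumerate_append, List.filterMap_append]

theorem pvEB_nonblank (A : List String) (s : Int) (h : ∀ x ∈ A, x ≠ "") :
    pvEB A s = [] := by
  induction A generalizing s with
  | nil => exact pvEB_nil s
  | cons a t ih =>
    rw [pvEB_cons_nonblank a t s (h a (by simp))]
    exact ih _ (fun x hx => h x (by simp [hx]))

theorem pvPairs_cons_cons (x y : Int) (t : List Int) (L : List String) :
    pvPairs (x :: y :: t) L =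
      (if y > x + 1 then [PySem.Str.join " " (PySem.List.slice L (some (x + 1)) (some y))] else [])
        ++ pvPairs (y :: t) L := by
  by_cases h : y > x + 1 <;> simp [pvPairs, h]

theorem pvPairs_single (x : Int) (L : List String) : pvPairs [x] L = [] := by
  simp [pvPairs]

theorem pv_slice_shift (pre ls : List String) (k : Nat) :
    PySem.List.slice (pre ++ ls) (some ((pre.length : Int) - 1 + 1))
        (some ((pre.length : Int) + (k : Int))) = ls.take k := by
  have h1 : (pre.length : Int) - 1 + 1 = ((pre.length : Nat) : Int) := by omega
  have h2 : (pre.length : Int) + (k : Int) = ((pre.length + k : Nat) : Int) := by push_cast; ring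
  rw [h1, h2, PySem.List.slice_natCast]
  simp

theorem pv_dropWhile_head (p : String → Bool) :
    ∀ (l : List String) (x : String) (t : List String),
      l.dropWhile p = x :: t → p x = false := by
  intro l
  induction l with
  | nil => intro x t h; simp at h
  | cons a r ih =>
    intro x t h
    by_cases ha : p a
    · rw [List.dropWhile_cons, if_pos ha] at h
      exact ih x t h
    · rw [List.dropWhile_cons, if_neg ha] at h
      cases h
      simpa using ha

-- main bridge: B's boundary pairs over pre ++ ls compute the run-based entries of ls
theorem pv_bridge_aux (n : Nat) : ∀ (ls pre : List String), ls.length ≤ n →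
    pvPairs (pvBnds ls (pre.length : Int)) (pre ++ ls) = pvAltB ls := by
  induction n with
  | zero =>
    intro ls pre hlen
    have : ls = [] := List.length_eq_zero_iff.mp (Nat.le_zero.mp hlen)
    subst this
    rw [pvBnds, pvEB_nil]
    have : pvPairs [(pre.length : Int) - 1, (pre.length : Int) + ((0 : Nat) : Int)] (pre ++ []) = [] := by
      rw [pvPairs_cons_cons]
      simp [pvPairs_single]
    simpa [pvAltB_nil] using this
  | succ n ihn =>
    intro ls pre hlen
    cases ls with
    | nil =>
      rw [pvBnds, pvEB_nil]
      have : pvPairs [(pre.length : Int) - 1, (pre.length : Int) + ((0 : Nat) : Int)] (pre ++ []) = [] := by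
        rw [pvPairs_cons_cons]
        simp [pvPairs_single]
      simpa [pvAltB_nil] using this
    | cons s rest =>
      by_cases hb : s = ""
      · subst hb
        -- bounds = (c-1) :: pvBnds rest (c+1); first pair (c-1, c) is skipped
        have hbnds : pvBnds ("" :: rest) (pre.length : Int)
            = ((pre.length : Int) - 1) :: pvBnds rest ((pre.length : Int) + 1) := by
          rw [pvBnds, pvBnds, pvEB_cons_blank]
          simp only [List.length_cons]
          have : (pre.length : Int) + ((rest.length + 1 : Nat) : Int)
              = (pre.length : Int) + 1 + (rest.length : Int) := by push_cast; ring
          rw [this]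
          simp
        rw [hbnds]
        have hhead : pvBnds rest ((pre.length : Int) + 1)
            = ((pre.length : Int) + 1 - 1) :: (pvEB rest ((pre.length : Int) + 1)
                ++ [(pre.length : Int) + 1 + (rest.length : Int)]) := rfl
        rw [hhead, pvPairs_cons_cons]
        have hskip : ¬ ((pre.length : Int) + 1 - 1 > (pre.length : Int) - 1 + 1) := by omega
        rw [if_neg hskip]
        have hpre' : pre ++ "" :: rest = (pre ++ [""]) ++ rest := by simp
        have hc : (pre.length : Int) + 1 = ((pre ++ [""]).length : Int) := by simp
        rw [List.nil_append, ← hhead, hpre', hc]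
        rw [ihn rest (pre ++ [""]) (by simpa using Nat.le_of_succ_le_succ (by simpa using hlen))]
        rw [pvAltB_blank]
      · -- non-blank head: the run s :: takeWhile, then recurse past the first blank
        set p : String → Bool := fun t => (t == "") == false with hp
        set A : List String := rest.takeWhile p with hA
        set R : List String := rest.dropWhile p with hR
        have hAR : rest = A ++ R := (List.takeWhile_append_dropWhile).symm
        have hAnb : ∀ x ∈ s :: A, x ≠ "" := by
          intro x hx
          rcases List.mem_cons.mp hx with h | h
          · subst h; exact hb
          · have := List.mem_takeWhile_imp (hA ▸ h)
            simpa [hp] using this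
        have hEBsA : pvEB (s :: A) (pre.length : Int) = [] := pvEB_nonblank _ _ hAnb
        have hlenA : (s :: A).length = A.length + 1 := by simp
        cases hRc : R with
        | nil =>
          -- whole list is one non-blank run
          have hls : s :: rest = s :: A := by rw [hAR, hRc]; simp
          rw [hls]
          rw [pvBnds, hEBsA, List.nil_append]
          rw [pvPairs_cons_cons]
          have hcond : (pre.length : Int) + (((s :: A).length : Nat) : Int) > (pre.length : Int) - 1 + 1 := by
            simp only [hlenA]; push_cast; omega
          rw [if_pos hcond, pvPairs_single, List.append_nil]
          rw [pv_slice_shift pre (s :: A) (s :: A).length]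
          rw [List.take_length]
          rw [pvAltB_cons_nonblank s A hb]
          have htwA : A.takeWhile (fun t => (t == "") == false) = A :=
            List.takeWhile_eq_self_iff.mpr (by
              intro x hx
              have hxne : x ≠ "" := hAnb x (by simp [hx])
              simp [hxne])
          have hdwA : A.dropWhile (fun t => (t == "") == false) = [] :=
            List.dropWhile_eq_nil_iff.mpr (by
              intro x hx
              have hxne : x ≠ "" := hAnb x (by simp [hx])
              simp [hxne])
          rw [htwA, hdwA]
          simp [pvAltB_nil]
        | cons r B =>
          have hr : r = "" := by
            have := pv_dropWhile_head p rest r B (hR ▸ hRc)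
            simpa [hp] using this
          subst hr
          -- ls = (s :: A) ++ "" :: B
          have hls : s :: rest = (s :: A) ++ ("" :: B) := by rw [hAR, hRc]; simp
          rw [hls]
          have hEB : pvEB ((s :: A) ++ ("" :: B)) (pre.length : Int)
              = ((pre.length : Int) + ((s :: A).length : Int)) ::
                  pvEB B ((pre.length : Int) + ((s :: A).length : Int) + 1) := by
            rw [pvEB_append, hEBsA, List.nil_append, pvEB_cons_blank]
          have hbnds : pvBnds ((s :: A) ++ ("" :: B)) (pre.length : Int)
              = ((pre.length : Int) - 1) ::
                  pvBnds B ((pre.length : Int) + ((s :: A).length : Int) + 1) := by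
            rw [pvBnds, hEB, pvBnds]
            have e1 : (pre.length : Int) + ((s :: A).length : Int) + 1 - 1
                = (pre.length : Int) + ((s :: A).length : Int) := by omega
            have e2 : (pre.length : Int) + ((((s :: A) ++ ("" :: B)).length : Nat) : Int)
                = (pre.length : Int) + ((s :: A).length : Int) + 1 + (B.length : Int) := by
              push_cast [List.length_append, List.length_cons]; ring
            rw [e1, e2]
            simp
          rw [hbnds]
          have hhead : pvBnds B ((pre.length : Int) + ((s :: A).length : Int) + 1)
              = ((pre.length : Int) + ((s :: A).length : Int) + 1 - 1) ::
                  (pvEB B ((pre.length : Int) + ((s :: A).length : Int) + 1)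
                    ++ [(pre.length : Int) + ((s :: A).length : Int) + 1 + (B.length : Int)]) := rfl
          rw [hhead, pvPairs_cons_cons]
          have hcond : (pre.length : Int) + ((s :: A).length : Int) + 1 - 1
              > (pre.length : Int) - 1 + 1 := by
            have : (1 : Int) ≤ ((s :: A).length : Int) := by
              have : 1 ≤ (s :: A).length := by simp
              exact_mod_cast this
            omega
          rw [if_pos hcond]
          have hsl : PySem.List.slice (pre ++ ((s :: A) ++ ("" :: B)))
              (some ((pre.length : Int) - 1 + 1))
              (some ((pre.length : Int) + ((s :: A).length : Int) + 1 - 1)) = s :: A := by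
            have he : (pre.length : Int) + ((s :: A).length : Int) + 1 - 1
                = (pre.length : Int) + (((s :: A).length : Nat) : Int) := by omega
            rw [he, pv_slice_shift pre ((s :: A) ++ ("" :: B)) (s :: A).length]
            rw [List.take_left]
          rw [hsl]
          -- recurse on B with pre' = pre ++ (s :: A) ++ [""]
          have hpre' : pre ++ ((s :: A) ++ ("" :: B)) = (pre ++ (s :: A) ++ [""]) ++ B := by simp
          have hcB : (pre.length : Int) + ((s :: A).length : Int) + 1
              = (((pre ++ (s :: A) ++ [""]).length : Nat) : Int) := by
            simp; push_cast; ring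
          rw [← hhead, hpre', hcB]
          have hlenB : B.length ≤ n := by
            have h1 : rest.length ≤ n := by simpa using Nat.le_of_succ_le_succ (by simpa using hlen)
            have h2 : rest.length = A.length + (1 + B.length) := by
              rw [hAR, hRc]; simp; omega
            omega
          rw [ihn B (pre ++ (s :: A) ++ [""]) hlenB]
          -- right-hand side
          rw [← hls, pvAltB_cons_nonblank s rest hb]
          rw [show rest.takeWhile (fun t => (t == "") == false) = A from hA.symm,
              show rest.dropWhile (fun t => (t == "") == false) = R from hR.symm, hRc]
          rw [pvAltB_blank]
          simp

theorem pv_bridge (ls : List String) :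
    pvPairs (pvBnds ls 0) ls = pvAltB ls := by
  have := pv_bridge_aux ls.length ls [] le_rfl
  simpa using this

theorem pv_altB_ne_aux (n : Nat) : ∀ ss : List String, ss.length ≤ n →
    (∀ s ∈ ss, PySem.Str.strip s = s) → ∀ e ∈ pvAltB ss, e ≠ "" := by
  induction n with
  | zero =>
    intro ss hlen hss
    cases ss with
    | nil => simp [pvAltB_nil]
    | cons s rest => simp at hlen
  | succ n ihn =>
    intro ss hlen hss
    cases ss with
    | nil => simp [pvAltB_nil]
    | cons s rest =>
      by_cases hb : s = ""
      · subst hb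
        rw [pvAltB_blank]
        exact ihn rest (by simp at hlen; omega) (fun t ht => hss t (by simp [ht]))
      · rw [pvAltB_cons_nonblank s rest hb]
        intro e he
        rcases List.mem_cons.mp he with h | h
        · subst h
          have hgood : pvSGood (PySem.Str.join " "
              (s :: rest.takeWhile (fun t => (t == "") == false))) := by
            apply pv_sjoin_good _ (by simp)
            intro q hq
            rcases List.mem_cons.mp hq with h' | h'
            · rw [h']; exact ⟨hss s (by simp), hb⟩
            · have hq1 : q ∈ rest := (List.takeWhile_sublist _).subset h'
              have hq2 := List.mem_takeWhile_imp h'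
              simp only [beq_iff_eq] at hq2
              refine ⟨hss q (by simp [hq1]), by simpa using hq2⟩
          exact hgood.2
        · have hsub : (rest.dropWhile (fun t => (t == "") == false)).length ≤ n := by
            have := List.length_dropWhile_le (fun t : String => (t == "") == false) rest
            simp at hlen; omega
          refine ihn _ hsub ?_ e h
          intro t ht
          exact hss t (by simp [(List.dropWhile_sublist _).subset ht])

theorem pv_altB_ne (ss : List String) (hss : ∀ s ∈ ss, PySem.Str.strip s = s) :
    ∀ e ∈ pvAltB ss, e ≠ "" :=
  pv_altB_ne_aux ss.length ss le_rfl hss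

-- B's port is exactly pvPairs (pvBnds lines 0) lines
theorem pv_alt_eq (text : String) :
    split_entries_alt text
      = pvPairs (pvBnds ((PySem.Str.splitlines text).map PySem.Str.strip) 0)
          ((PySem.Str.splitlines text).map PySem.Str.strip) := by
  unfold split_entries_alt pvPairs pvBnds pvEB
  simp

-- ===== VERDICT (by name: the statement is the Claim_ definition above) =====
theorem split_entries_spec : Claim_equal_split_entries := by
  intro text _
  unfold Spec_split_entries
  rw [pv_alt_eq, pv_bridge]
  unfold split_entries
  have hstepeq : (fun (st : List String × List String) ln =>
      if PySem.Str.strip ln = "" then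
        (if st.2 ≠ [] then (st.1 ++ [PySem.Str.strip (PySem.Str.join " " st.2)], ([] : List String)) else st)
      else (st.1, st.2 ++ [PySem.Str.strip ln]))
      = (fun st ln => pvStep st (PySem.Str.strip ln)) := rfl
  simp only [hstepeq, List.foldl_map, pv_sstrip_rstrip]
  rw [show ((PySem.Str.splitlines text).foldl (fun st ln => pvStep st (PySem.Str.strip ln))
        (([] : List String), ([] : List String)))
      = (((PySem.Str.splitlines text).map PySem.Str.strip).foldl pvStep ([], [])) from
    (List.foldl_map).symm]
  have hss : ∀ s ∈ (PySem.Str.splitlines text).map PySem.Str.strip, PySem.Str.strip s = s := by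
    intro s hsm
    simp only [List.mem_map] at hsm
    obtain ⟨ln, _, rfl⟩ := hsm
    exact pv_sstrip_idem ln
  have hmain := pv_main ((PySem.Str.splitlines text).map PySem.Str.strip) [] hss (by simp)
  simp only [if_true, reduceIte] at hmain
  have hfin : (if (((PySem.Str.splitlines text).map PySem.Str.strip).foldl pvStep ([], [])).2 ≠ [] then
        (((PySem.Str.splitlines text).map PySem.Str.strip).foldl pvStep ([], [])).1
          ++ [PySem.Str.strip (PySem.Str.join " "
            ((((PySem.Str.splitlines text).map PySem.Str.strip).foldl pvStep ([], [])).2))]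
      else (((PySem.Str.splitlines text).map PySem.Str.strip).foldl pvStep ([], [])).1)
      = pvFinish (((PySem.Str.splitlines text).map PySem.Str.strip).foldl pvStep ([], [])) := rfl
  rw [hfin, hmain]
  have hne := pv_altB_ne ((PySem.Str.splitlines text).map PySem.Str.strip) hss
  rw [List.filter_eq_self.mpr (by intro a ha; simpa using hne a ha)]
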